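-- pv_equiv track=rewrite | github.com/MarcusJellinghaus/mcp-coder-utils | src/mcp_coder_utils/redaction.py | redact_env_vars
-- ===== SOURCE A (Python) =====
-- from collections.abc import Mapping
--
-- REDACTED_VALUE = "***"
--
-- SENSITIVE_KEY_PATTERNS: frozenset[str] = frozenset(
--     {
--         "token",
--         "secret",
--         "password",
--         "credential",
--         "api_key",
--         "access_key",
--     }
-- )
--
-- def redact_env_vars(
--     env: Mapping[str, str],
--     extra_patterns: frozenset[str] | None = None,
-- ) -> dict[str, str]:
--     """Redact env var values whose keys contain sensitive substrings (case-insensitive).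
--
--     Args:
--         env: Mapping of environment variable names to values.
--         extra_patterns: Additional substring patterns to merge with defaults.
--
--     Returns:
--         A new dict with sensitive values replaced by the redaction placeholder.
--     """
--     patterns = (
--         SENSITIVE_KEY_PATTERNS | extra_patterns
--         if extra_patterns
--         else SENSITIVE_KEY_PATTERNS
--     )
--     result: dict[str, str] = {}
--     for key, value in env.items():
--         key_lower = key.lower()
--         if any(pattern in key_lower for pattern in patterns):
--             result[key] = REDACTED_VALUE
--         else:
--             result[key] = value
--     return result
-- ===== SOURCE B (Python) =====
-- REDACTED_VALUE = "***"
--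
-- SENSITIVE_KEY_PATTERNS = frozenset(
--     {
--         "token",
--         "secret",
--         "password",
--         "credential",
--         "api_key",
--         "access_key",
--     }
-- )
--
--
-- def redact_env_vars(env, extra_patterns=None):
--     """Redact env var values whose keys contain sensitive substrings (case-insensitive).
--
--     Instead of scanning the key once per pattern, build the pattern set and the
--     set of pattern lengths once, then slide fixed-length windows over the key
--     and test each window for set membership.
--     """
--     patterns = (
--         SENSITIVE_KEY_PATTERNS | extra_patterns
--         if extra_patterns
--         else SENSITIVE_KEY_PATTERNS
--     )
--     pattern_set = set(patterns)
--     lengths = {len(p) for p in patterns}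
--
--     def sensitive(key_lower):
--         n = len(key_lower)
--         return any(
--             key_lower[i : i + L] in pattern_set
--             for L in lengths
--             for i in range(n - L + 1)
--         )
--
--     return {
--         key: (REDACTED_VALUE if sensitive(key.lower()) else value)
--         for key, value in env.items()
--     }
-- ===== Notes on version B (the rewrite author's own statement) =====
-- stated objective: alternative
-- what changed: A scans each key once per pattern with any(pattern in key_lower ...); B builds the pattern set and the set of pattern lengths once and instead slides fixed-length windows over the key, testing each window for set membership.
import Mathlib
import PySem

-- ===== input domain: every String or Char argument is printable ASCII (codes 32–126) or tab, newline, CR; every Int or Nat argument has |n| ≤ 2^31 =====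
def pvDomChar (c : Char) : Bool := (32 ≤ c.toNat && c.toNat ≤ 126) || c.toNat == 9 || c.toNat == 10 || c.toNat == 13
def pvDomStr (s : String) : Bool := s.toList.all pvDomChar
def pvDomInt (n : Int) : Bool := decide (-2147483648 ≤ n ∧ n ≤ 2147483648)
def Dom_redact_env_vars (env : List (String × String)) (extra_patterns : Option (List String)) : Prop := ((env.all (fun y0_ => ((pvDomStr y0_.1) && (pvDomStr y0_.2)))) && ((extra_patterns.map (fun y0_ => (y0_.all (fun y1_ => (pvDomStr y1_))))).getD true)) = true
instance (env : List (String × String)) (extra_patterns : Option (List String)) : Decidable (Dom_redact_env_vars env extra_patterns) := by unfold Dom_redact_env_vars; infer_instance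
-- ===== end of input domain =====

-- B replaces A's per-pattern scan of each key by a one-off pattern set + length set and a
-- fixed-length sliding-window membership test (alternative matching mechanism, same results).

def pvRedactedValue : String := "***"

def pvSensitiveKeyPatterns : PySem.Set String :=
  PySem.Set.ofList ["token", "secret", "password", "credential", "api_key", "access_key"]

-- ===== PORT A =====
def redact_env_vars (env : List (String × String)) (extra_patterns : Option (List String)) : List (String × String) :=
  let patterns : PySem.Set String :=
    match extra_patterns with
    | some ps => if ps.isEmpty then pvSensitiveKeyPatterns else PySem.Set.union pvSensitiveKeyPatterns ps
    | none => pvSensitiveKeyPatterns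
  (env.foldl (fun (result : PySem.Dict String String) kv =>
      let key_lower := PySem.Str.lower kv.1
      if patterns.any (fun pattern => PySem.Str.isIn pattern key_lower) then
        result.insert kv.1 pvRedactedValue
      else
        result.insert kv.1 kv.2)
    PySem.Dict.empty).items

-- ===== PORT B =====
-- helper: B's window-based sensitivity test
def pvSensitive (pattern_set : PySem.Set String) (lengths : PySem.Set Int) (key_lower : String) : Bool :=
  let n : Int := PySem.Str.len key_lower
  lengths.any (fun L =>
    (PySem.List.pyRange 0 (n - L + 1) 1).any (fun i =>
      pattern_set.contains (PySem.Str.slice key_lower (some i) (some (i + L)))))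

def redact_env_vars_alt (env : List (String × String)) (extra_patterns : Option (List String)) : List (String × String) :=
  let patterns : PySem.Set String :=
    match extra_patterns with
    | some ps => if ps.isEmpty then pvSensitiveKeyPatterns else PySem.Set.union pvSensitiveKeyPatterns ps
    | none => pvSensitiveKeyPatterns
  let pattern_set : PySem.Set String := PySem.Set.ofList patterns
  let lengths : PySem.Set Int := PySem.Set.ofList (patterns.map (fun p => PySem.Str.len p))
  (env.foldl (fun (d : PySem.Dict String String) kv =>
      d.insert kv.1 (if pvSensitive pattern_set lengths (PySem.Str.lower kv.1) then pvRedactedValue else kv.2))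
    PySem.Dict.empty).items

-- ===== PRECONDITION & SPEC =====
def Spec_redact_env_vars (env : List (String × String)) (extra_patterns : Option (List String)) (out : List (String × String)) : Prop := out = redact_env_vars_alt env extra_patterns
instance (env : List (String × String)) (extra_patterns : Option (List String)) (out : List (String × String)) : Decidable (Spec_redact_env_vars env extra_patterns out) := by unfold Spec_redact_env_vars; infer_instance

-- ===== CLAIM (what is proved, stated in full; the proofs are below) =====
def Claim_equal_redact_env_vars : Prop := ∀ (env : List (String × String)) (extra_patterns : Option (List String)), Dom_redact_env_vars env extra_patterns → Spec_redact_env_vars env extra_patterns (redact_env_vars env extra_patterns)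

-- ===== LEMMAS AND PROOFS =====

-- A window key_lower[i:i+L] (0 ≤ i, 0 ≤ L) is the list (drop i).take L
theorem pvWindow_toList (s : String) (i L : Int) (hi : 0 ≤ i) (hL : 0 ≤ L) :
    (PySem.Str.slice s (some i) (some (i + L))).toList
      = (s.toList.drop i.toNat).take L.toNat := by
  rw [PySem.Str.toList_slice, PySem.Chars.slice_eq_listSlice,
    PySem.List.slice_toNat s.toList hi (by omega)]
  congr 1
  omega

-- core equivalence: A's per-pattern scan equals B's window test, for ANY pattern list
theorem pvSensitive_eq (pats : List String) (kl : String) :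
    pats.any (fun pattern => PySem.Str.isIn pattern kl)
      = pvSensitive (PySem.Set.ofList pats) (PySem.Set.ofList (pats.map (fun p => PySem.Str.len p))) kl := by
  unfold pvSensitive
  rw [Bool.eq_iff_iff]
  simp only [List.any_eq_true]
  constructor
  · rintro ⟨p, hp, hin⟩
    rw [PySem.Str.isIn_iff_infix] at hin
    obtain ⟨j0, hj0⟩ := (PySem.Chars.exists_prefix_drop_iff_isIn p.toList kl.toList).2
      ((PySem.Chars.isIn_iff_infix _ _).2 hin)
    have hj : ∃ j, p.toList <+: kl.toList.drop j ∧ j + p.toList.length ≤ kl.toList.length := by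
      rcases eq_or_ne p.toList [] with hz | hz
      · exact ⟨0, by simp [hz], by simp [hz]⟩
      · have hlen := hj0.length_le
        rw [List.length_drop] at hlen
        have hjlen : j0 ≤ kl.toList.length := by
          by_contra hgt
          rw [List.drop_eq_nil_of_le (by omega)] at hj0
          exact hz (List.prefix_nil.mp hj0)
        exact ⟨j0, hj0, by omega⟩
    obtain ⟨j, hpre, hjle⟩ := hj
    refine ⟨PySem.Str.len p, ?_, (j : Int), ?_, ?_⟩
    · rw [PySem.Set.mem_ofList]
      exact List.mem_map.2 ⟨p, hp, rfl⟩
    · rw [PySem.List.mem_pyRange_one]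
      refine ⟨Int.natCast_nonneg _, ?_⟩
      simp only [PySem.Str.len_eq]
      omega
    · rw [PySem.Set.contains_iff, PySem.Set.mem_ofList]
      have hw : (PySem.Str.slice kl (some (j : Int)) (some ((j : Int) + PySem.Str.len p))).toList = p.toList := by
        rw [pvWindow_toList kl _ _ (Int.natCast_nonneg _) (by simp)]
        rw [Int.toNat_natCast]
        have hL : (PySem.Str.len p).toNat = p.toList.length := by simp
        rw [hL]
        exact (List.prefix_iff_eq_take.1 hpre).symm
      rw [String.toList_inj] at hw
      rw [hw]
      exact hp
  · rintro ⟨L, hL, i, hi, hc⟩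
    rw [PySem.List.mem_pyRange_one] at hi
    rw [PySem.Set.mem_ofList] at hL
    obtain ⟨q, -, hq⟩ := List.mem_map.1 hL
    have hLnn : 0 ≤ L := by
      rw [← hq]
      simp
    rw [PySem.Set.contains_iff, PySem.Set.mem_ofList] at hc
    refine ⟨_, hc, ?_⟩
    rw [PySem.Str.isIn_iff_infix, pvWindow_toList kl i L hi.1 hLnn]
    exact ((List.take_prefix _ _).isInfix).trans ((List.drop_suffix _ _).isInfix)

theorem pvFold_eq (pats : PySem.Set String) (env : List (String × String)) (d : PySem.Dict String String) :
    env.foldl (fun (result : PySem.Dict String String) kv =>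
      let key_lower := PySem.Str.lower kv.1
      if pats.any (fun pattern => PySem.Str.isIn pattern key_lower) then
        result.insert kv.1 pvRedactedValue
      else
        result.insert kv.1 kv.2) d
    = env.foldl (fun (d : PySem.Dict String String) kv =>
        d.insert kv.1 (if pvSensitive (PySem.Set.ofList pats) (PySem.Set.ofList (pats.map (fun p => PySem.Str.len p))) (PySem.Str.lower kv.1) then pvRedactedValue else kv.2)) d := by
  induction env generalizing d with
  | nil => rfl
  | cons kv rest ih =>
    simp only [List.foldl_cons]
    rw [← pvSensitive_eq pats (PySem.Str.lower kv.1)]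
    by_cases h : pats.any (fun pattern => PySem.Str.isIn pattern (PySem.Str.lower kv.1)) = true
    · simp only [h, if_true, ih]
    · simp only [Bool.not_eq_true] at h
      simp only [h, if_false, Bool.false_eq_true, ih]

-- ===== VERDICT (by name: the statement is the Claim_ definition above) =====
theorem redact_env_vars_spec : Claim_equal_redact_env_vars := by
  intro env extra_patterns _
  unfold Spec_redact_env_vars redact_env_vars redact_env_vars_alt
  exact congrArg PySem.Dict.items (pvFold_eq _ env PySem.Dict.empty)
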